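-- pv_equiv track=rewrite | github.com/alweiis/Algorithm | python/Programmers/Step2/할인 행사.py | solution
-- ===== SOURCE A (Python) =====
-- from collections import defaultdict
--
-- def solution(want, number, discount):
--     answer = 0
--     needs = {}
--     sales = defaultdict(int)
--     for name, quantity in zip(want, number):
--         needs[name] = quantity
--     for product in discount[0:10]:
--         sales[product] += 1
--     if needs == sales:
--         answer += 1
--     for i in range(len(discount)-10):
--         sales[discount[i]] -= 1
--         if sales[discount[i]] == 0:
--             sales.pop(discount[i])
--         sales[discount[i+10]] += 1
--         if needs == sales:
--             answer += 1
--     return answer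
-- ===== SOURCE B (Python) =====
-- from collections import Counter
--
-- def solution(want, number, discount):
--     needs = dict(zip(want, number))
--     count = 0
--     for start in range(max(1, len(discount) - 9)):
--         if Counter(discount[start:start + 10]) == needs:
--             count += 1
--     return count
-- ===== Notes on version B (the rewrite author's own statement) =====
-- stated objective: simpler
-- what changed: Replaces the incrementally maintained sliding-window counter (decrement/pop/increment per shift) with a stateless recount: each 10-day window is re-counted from scratch with Counter and compared to the needs dict.
import Mathlib
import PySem

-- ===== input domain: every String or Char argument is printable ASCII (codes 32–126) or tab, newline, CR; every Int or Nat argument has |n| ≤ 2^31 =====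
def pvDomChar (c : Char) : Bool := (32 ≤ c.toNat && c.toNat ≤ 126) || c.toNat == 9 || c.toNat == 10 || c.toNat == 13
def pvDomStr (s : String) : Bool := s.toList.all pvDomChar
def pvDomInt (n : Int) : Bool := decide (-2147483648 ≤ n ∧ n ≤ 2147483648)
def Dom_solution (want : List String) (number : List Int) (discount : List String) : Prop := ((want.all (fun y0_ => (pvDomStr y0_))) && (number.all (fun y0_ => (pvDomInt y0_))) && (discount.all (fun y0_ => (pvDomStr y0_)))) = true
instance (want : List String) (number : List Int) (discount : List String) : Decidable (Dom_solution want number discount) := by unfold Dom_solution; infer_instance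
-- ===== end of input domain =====

-- B replaces A's incrementally maintained sliding-window counter with a stateless
-- recount of each 10-day window from scratch (objective: simpler; same results).

-- Python's `d1 == d2` on dicts: same keys with same values, insertion order ignored.
def pyDictEq (d e : PySem.Dict String Int) : Bool :=
  d.items.all (fun p => e.get? p.1 == some p.2) && e.items.all (fun p => d.get? p.1 == some p.2)

-- ===== PORT A =====
-- the body of A's sliding loop: sales[discount[i]] -= 1; pop if 0; sales[discount[i+10]] += 1; compare
def solutionStep (needs : PySem.Dict String Int) (discount : List String)
    (st : PySem.Dict String Int × Int) (i : Int) : PySem.Dict String Int × Int :=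
  let a := PySem.List.pyGetD discount i ""
  let s1 := st.1.modify a 0 (· - 1)
  let s2 := if s1.getD a 0 == 0 then s1.erase a else s1
  let b := PySem.List.pyGetD discount (i + 10) ""
  let s3 := s2.modify b 0 (· + 1)
  (s3, if pyDictEq needs s3 then st.2 + 1 else st.2)

def solution (want : List String) (number : List Int) (discount : List String) : Int :=
  let needs := (want.zip number).foldl (fun d p => d.insert p.1 p.2) PySem.Dict.empty
  let sales := (PySem.List.slice discount (some 0) (some 10)).foldl
    (fun d x => d.modify x 0 (· + 1)) PySem.Dict.empty
  let answer : Int := if pyDictEq needs sales then 1 else 0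
  ((PySem.List.pyRange 0 ((discount.length : Int) - 10) 1).foldl
    (solutionStep needs discount) (sales, answer)).2

-- ===== PORT B =====
def solution_alt (want : List String) (number : List Int) (discount : List String) : Int :=
  let needs := (want.zip number).foldl (fun d p => d.insert p.1 p.2) PySem.Dict.empty
  (PySem.List.pyRange 0 (max 1 ((discount.length : Int) - 9)) 1).foldl
    (fun acc s =>
      if pyDictEq (PySem.Dict.counter (PySem.List.slice discount (some s) (some (s + 10)))) needs
      then acc + 1 else acc) 0

-- ===== PRECONDITION & SPEC =====
def Spec_solution (want : List String) (number : List Int) (discount : List String) (out : Int) : Prop := out = solution_alt want number discount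
instance (want : List String) (number : List Int) (discount : List String) (out : Int) : Decidable (Spec_solution want number discount out) := by unfold Spec_solution; infer_instance

-- ===== CLAIM (what is proved, stated in full; the proofs are below) =====
def Claim_equal_solution : Prop := ∀ (want : List String) (number : List Int) (discount : List String), Dom_solution want number discount → Spec_solution want number discount (solution want number discount)

-- ===== LEMMAS AND PROOFS =====

-- the dictionary produced by one pass of A's loop body
def pvNext (d : PySem.Dict String Int) (a b : String) : PySem.Dict String Int :=
  (if (d.modify a 0 (· - 1)).getD a 0 == 0
   then (d.modify a 0 (· - 1)).erase a
   else d.modify a 0 (· - 1)).modify b 0 (· + 1)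

theorem pv_step_eq (needs : PySem.Dict String Int) (discount : List String)
    (d : PySem.Dict String Int) (ans : Int) (i : Int) :
    solutionStep needs discount (d, ans) i =
      (pvNext d (PySem.List.pyGetD discount i "") (PySem.List.pyGetD discount (i + 10) ""),
       if pyDictEq needs (pvNext d (PySem.List.pyGetD discount i "")
           (PySem.List.pyGetD discount (i + 10) "")) then ans + 1 else ans) := rfl

-- get? after erase (no such lemma in the prelude)
theorem pv_find?_filter_ne (k k' : String) (l : List (String × Int)) :
    (l.filter (fun p => !(p.1 == k))).find? (fun p => p.1 == k') =
      if k' = k then none else l.find? (fun p => p.1 == k') := by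
  induction l with
  | nil => split <;> simp
  | cons x xs ih =>
    rw [List.filter_cons]
    by_cases hk : k' = k
    · subst hk
      by_cases hx : x.1 = k'
      · simp [hx, ih]
      · simp [hx, ih]
    · by_cases hx : x.1 = k
      · have hx' : x.1 ≠ k' := fun h => hk ((h ▸ hx : k' = k))
        have hkk : (k == k') = false := by
          simp only [beq_eq_false_iff_ne, ne_eq]
          exact fun hh => hk hh.symm
        simp [hx, ih, hk, hkk]
      · by_cases hx' : x.1 = k'
        · simp [hx', hk]
        · simp [hx, hx', ih, hk]

theorem pv_get?_erase (d : PySem.Dict String Int) (k k' : String) :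
    (d.erase k).get? k' = if k' = k then none else d.get? k' := by
  show ((d.items.filter _).find? _).map _ = _
  rw [pv_find?_filter_ne k k' d.items]
  split <;> rfl

theorem pv_nodup_keys_erase (d : PySem.Dict String Int) (k : String)
    (h : d.keys.Nodup) : (d.erase k).keys.Nodup := by
  have hsub : (d.erase k).items.Sublist d.items := List.filter_sublist
  exact (hsub.map Prod.fst).nodup h

-- get? of Counter(xs)
theorem pv_get?_counter (xs : List String) (k : String) :
    (PySem.Dict.counter xs).get? k =
      if xs.count k = 0 then none else some (xs.count k : Int) := by
  by_cases hmem : k ∈ xs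
  · have hc : (PySem.Dict.counter xs).contains k = true := by
      rw [PySem.Dict.contains_counter]; simpa using hmem
    have hs : ((PySem.Dict.counter xs).get? k).isSome := by
      rw [← PySem.Dict.contains_eq_isSome_get?]; exact hc
    obtain ⟨v, hv⟩ := Option.isSome_iff_exists.mp hs
    have hgd := PySem.Dict.getD_counter xs k
    rw [PySem.Dict.getD_eq_get?_getD, hv] at hgd
    simp at hgd
    have hcp : 0 < xs.count k := List.count_pos_iff.mpr hmem
    rw [hv, hgd, if_neg hcp.ne']
  · have h0 : xs.count k = 0 := List.count_eq_zero.mpr hmem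
    rw [h0, if_pos rfl, PySem.Dict.get?_eq_none_iff_contains,
      PySem.Dict.contains_counter]
    simpa using hmem

-- pyDictEq ignores how its second argument was built: only lookups matter
theorem pv_pyDictEq_congr (e d d' : PySem.Dict String Int)
    (hd : d.keys.Nodup) (hd' : d'.keys.Nodup)
    (h : ∀ k, d.get? k = d'.get? k) : pyDictEq e d = pyDictEq e d' := by
  unfold pyDictEq
  have h1 : (fun (p : String × Int) => d.get? p.1 == some p.2) =
      (fun p => d'.get? p.1 == some p.2) := by funext p; rw [h]
  rw [h1]
  congr 1
  rw [Bool.eq_iff_iff]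
  simp only [List.all_eq_true]
  constructor
  · rintro ha ⟨k, v⟩ hm
    have hv : d'.get? k = some v := (PySem.Dict.get?_eq_some_iff_mem_items d' k v hd').mpr hm
    rw [← h] at hv
    exact ha _ ((PySem.Dict.get?_eq_some_iff_mem_items d k v hd).mp hv)
  · rintro ha ⟨k, v⟩ hm
    have hv : d.get? k = some v := (PySem.Dict.get?_eq_some_iff_mem_items d k v hd).mpr hm
    rw [h] at hv
    exact ha _ ((PySem.Dict.get?_eq_some_iff_mem_items d' k v hd').mp hv)

theorem pv_pyDictEq_comm (d e : PySem.Dict String Int) : pyDictEq d e = pyDictEq e d := by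
  unfold pyDictEq; exact Bool.and_comm _ _

theorem pv_nodup_keys_next (d : PySem.Dict String Int) (a b : String)
    (h : d.keys.Nodup) : (pvNext d a b).keys.Nodup := by
  unfold pvNext PySem.Dict.modify
  split
  · exact PySem.Dict.nodup_keys_insert _ _ _
      (pv_nodup_keys_erase _ _ (PySem.Dict.nodup_keys_insert _ _ _ h))
  · exact PySem.Dict.nodup_keys_insert _ _ _ (PySem.Dict.nodup_keys_insert _ _ _ h)

-- one slide of A's window update, stated against Counter lookups
theorem pv_step_dict (d : PySem.Dict String Int) (a b : String) (mid : List String)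
    (h : ∀ k, d.get? k = (PySem.Dict.counter (a :: mid)).get? k) (k : String) :
    (pvNext d a b).get? k = (PySem.Dict.counter (mid ++ [b])).get? k := by
  have ha : d.getD a 0 = ((mid.count a : Int) + 1) := by
    rw [PySem.Dict.getD_eq_get?_getD, h a, pv_get?_counter]
    simp [List.count_cons_self]
  -- after decrement + conditional pop the dict looks up like Counter(mid)
  have h2 : ∀ k', (if (d.modify a 0 (· - 1)).getD a 0 == 0
      then (d.modify a 0 (· - 1)).erase a else d.modify a 0 (· - 1)).get? k' =
      (PySem.Dict.counter mid).get? k' := by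
    intro k'
    simp only [PySem.Dict.modify, PySem.Dict.getD_insert_self, ha]
    have hval : (mid.count a : Int) + 1 - 1 = (mid.count a : Int) := by ring
    rw [hval, pv_get?_counter]
    by_cases hc : mid.count a = 0
    · rw [if_pos (by simp [hc]), pv_get?_erase]
      by_cases hk : k' = a
      · simp [hk, hc]
      · rw [if_neg hk, PySem.Dict.get?_insert, if_neg hk, h k', pv_get?_counter]
        have hk' : ¬a = k' := fun hh => hk hh.symm
        simp [hk']
    · rw [if_neg (by simp [hc]), PySem.Dict.get?_insert]
      by_cases hk : k' = a
      · simp [hk, hc]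
      · rw [if_neg hk, h k', pv_get?_counter]
        have hk' : ¬a = k' := fun hh => hk hh.symm
        simp [hk']
  have hb : (if (d.modify a 0 (· - 1)).getD a 0 == 0
      then (d.modify a 0 (· - 1)).erase a else d.modify a 0 (· - 1)).getD b 0 =
      (mid.count b : Int) := by
    rw [PySem.Dict.getD_eq_get?_getD, h2 b, pv_get?_counter]
    by_cases hc : mid.count b = 0 <;> simp [hc]
  obtain ⟨X, hX⟩ : ∃ X, (if (d.modify a 0 (· - 1)).getD a 0 == 0
      then (d.modify a 0 (· - 1)).erase a else d.modify a 0 (· - 1)) = X := ⟨_, rfl⟩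
  rw [hX] at h2 hb
  unfold pvNext
  rw [hX]
  simp only [PySem.Dict.modify, hb]
  rw [PySem.Dict.get?_insert, pv_get?_counter]
  by_cases hk : k = b
  · subst hk
    rw [if_pos rfl, if_neg (by simp [List.count_append])]
    simp [List.count_append]
  · rw [if_neg hk, h2 k, pv_get?_counter]
    have hk' : ¬b = k := fun hh => hk hh.symm
    simp [List.count_append, hk']

-- A's sliding loop, characterised: it adds one per matching later window
theorem pv_loopA (needs : PySem.Dict String Int) (discount : List String) :
    ∀ (m i : Nat) (d : PySem.Dict String Int) (ans : Int),
      i + 10 + m = discount.length →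
      d.keys.Nodup →
      (∀ k, d.get? k = (PySem.Dict.counter
        (PySem.List.slice discount (some (i : Int)) (some ((i : Int) + 10)))).get? k) →
      ((PySem.List.pyRange (i : Int) ((discount.length : Int) - 10) 1).foldl
        (solutionStep needs discount) (d, ans)).2 =
      ans + ((PySem.List.pyRange ((i : Int) + 1) ((discount.length : Int) - 9) 1).countP
        (fun s => pyDictEq needs
          (PySem.Dict.counter (PySem.List.slice discount (some s) (some (s + 10))))) : Int) := by
  intro m
  induction m with
  | zero =>
    intro i d ans hlen hnd h
    rw [PySem.List.pyRange_one_eq_nil (by omega), PySem.List.pyRange_one_eq_nil (by omega)]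
    simp
  | succ m ih =>
    intro i d ans hlen hnd h
    have hin : i < discount.length := by omega
    have hin10 : i + 10 < discount.length := by omega
    have hib : (i : Int) < (discount.length : Int) - 10 := by omega
    rw [PySem.List.pyRange_one_cons hib, List.foldl_cons, pv_step_eq]
    -- the two accessed elements
    have hga : PySem.List.pyGetD discount (i : Int) "" = discount[i] := by
      rw [PySem.List.pyGetD_natCast, List.getD_eq_getElem _ _ hin]
    have hgb : PySem.List.pyGetD discount ((i : Int) + 10) "" = discount[i + 10] := by
      have hcast : (i : Int) + 10 = ((i + 10 : Nat) : Int) := by push_cast; ring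
      rw [hcast, PySem.List.pyGetD_natCast, List.getD_eq_getElem _ _ hin10]
    -- window decomposition
    have hwin : PySem.List.slice discount (some (i : Int)) (some ((i : Int) + 10)) =
        discount[i] :: (discount.drop (i + 1)).take 9 := by
      have hcast : (i : Int) + 10 = ((i + 10 : Nat) : Int) := by push_cast; ring
      rw [hcast, PySem.List.slice_natCast]
      have h10 : i + 10 - i = 10 := by omega
      rw [h10, List.drop_eq_getElem_cons hin, show (10 : Nat) = 9 + 1 from rfl,
        List.take_succ_cons]
    have hwin' : PySem.List.slice discount (some ((i : Int) + 1)) (some ((i : Int) + 1 + 10)) =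
        (discount.drop (i + 1)).take 9 ++ [discount[i + 10]] := by
      have hc1 : (i : Int) + 1 = ((i + 1 : Nat) : Int) := by push_cast; ring
      have hc2 : ((i + 1 : Nat) : Int) + 10 = ((i + 1 + 10 : Nat) : Int) := by push_cast; ring
      rw [hc1, hc2, PySem.List.slice_natCast]
      have h10 : i + 1 + 10 - (i + 1) = 10 := by omega
      rw [h10]
      rw [show List.take 10 (discount.drop (i + 1)) = List.take (9 + 1) (discount.drop (i + 1))
        from rfl, List.take_add_one]
      congr 1
      rw [List.getElem?_drop]
      have h19 : i + 1 + 9 = i + 10 := by omega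
      simp [h19, List.getElem?_eq_getElem hin10]
    rw [hwin] at h
    rw [hga, hgb]
    have h' : ∀ k, (pvNext d discount[i] discount[i + 10]).get? k =
        (PySem.Dict.counter (PySem.List.slice discount (some ((i : Int) + 1))
          (some ((i : Int) + 1 + 10)))).get? k := by
      intro k
      rw [hwin']
      exact pv_step_dict d _ _ _ h k
    have hnd' := pv_nodup_keys_next d discount[i] discount[i + 10] hnd
    have hcast1 : (i : Int) + 1 = ((i + 1 : Nat) : Int) := by push_cast; ring
    have ihr := ih (i + 1) (pvNext d discount[i] discount[i + 10])
      (if pyDictEq needs (pvNext d discount[i] discount[i + 10]) then ans + 1 else ans)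
      (by omega) hnd' (by rw [← hcast1]; exact h')
    rw [← hcast1] at ihr
    rw [ihr]
    -- reassemble the right-hand count
    have hib' : (i : Int) + 1 < (discount.length : Int) - 9 := by omega
    rw [PySem.List.pyRange_one_cons hib', List.countP_cons]
    have hflip : pyDictEq needs (pvNext d discount[i] discount[i + 10]) =
        pyDictEq needs (PySem.Dict.counter (PySem.List.slice discount (some ((i : Int) + 1))
          (some ((i : Int) + 1 + 10)))) :=
      pv_pyDictEq_congr _ _ _ hnd' (PySem.Dict.nodup_keys_counter _) h'
    rw [hflip]
    split <;> push_cast <;> ring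

-- let-free computations of the two ports (definitional: `rfl` zeta-reduces the `let`s)
theorem pv_solution_unfold (want : List String) (number : List Int) (discount : List String) :
    solution want number discount =
      ((PySem.List.pyRange 0 ((discount.length : Int) - 10) 1).foldl
        (solutionStep ((want.zip number).foldl (fun d p => d.insert p.1 p.2) PySem.Dict.empty)
          discount)
        (PySem.Dict.counter (PySem.List.slice discount (some 0) (some 10)),
         if pyDictEq ((want.zip number).foldl (fun d p => d.insert p.1 p.2) PySem.Dict.empty)
              (PySem.Dict.counter (PySem.List.slice discount (some 0) (some 10)))
         then 1 else 0)).2 := by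
  rw [PySem.Dict.counter_eq_foldl]; rfl

theorem pv_solution_alt_unfold (want : List String) (number : List Int) (discount : List String) :
    solution_alt want number discount =
      (PySem.List.pyRange 0 (max 1 ((discount.length : Int) - 9)) 1).foldl
        (fun acc s =>
          if pyDictEq (PySem.Dict.counter (PySem.List.slice discount (some s) (some (s + 10))))
              ((want.zip number).foldl (fun d p => d.insert p.1 p.2) PySem.Dict.empty)
          then acc + 1 else acc) 0 := rfl

-- ===== VERDICT (by name: the statement is the Claim_ definition above) =====
theorem solution_spec : Claim_equal_solution := by
  intro want number discount _hdom
  unfold Spec_solution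
  rw [pv_solution_unfold, pv_solution_alt_unfold]
  set nd := (want.zip number).foldl (fun d p => d.insert p.1 p.2) PySem.Dict.empty with hnd
  have h010 : (0 : Int) + 10 = 10 := by norm_num
  have h01 : (0 : Int) < max 1 ((discount.length : Int) - 9) :=
    lt_of_lt_of_le one_pos (le_max_left _ _)
  rw [PySem.List.pyRange_one_cons h01, List.foldl_cons, PySem.List.foldl_if_add_one,
    show (0 : Int) + 1 = 1 from by norm_num]
  by_cases hlen : discount.length < 10
  · -- short discount: A does only the initial comparison, B checks the single start 0
    rw [PySem.List.pyRange_one_eq_nil (by omega)]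
    have hmax : max 1 ((discount.length : Int) - 9) = 1 := max_eq_left (by omega)
    rw [hmax, PySem.List.pyRange_one_eq_nil le_rfl]
    simp only [List.foldl_nil, List.countP_nil, Nat.cast_zero, add_zero]
    rw [h010, pv_pyDictEq_comm]
  · -- long discount: A's loop contributes the checks for the later windows
    have hA := pv_loopA nd discount (discount.length - 10) 0
      (PySem.Dict.counter (PySem.List.slice discount (some 0) (some 10)))
      (if pyDictEq nd (PySem.Dict.counter (PySem.List.slice discount (some 0) (some 10)))
        then 1 else 0)
      (by omega) (PySem.Dict.nodup_keys_counter _)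
      (by intro k; rw [Nat.cast_zero, h010])
    rw [Nat.cast_zero, show (0 : Int) + 1 = 1 from by norm_num] at hA
    have hmax : max 1 ((discount.length : Int) - 9) = (discount.length : Int) - 9 :=
      max_eq_right (by omega)
    have hcnt : (PySem.List.pyRange 1 ((discount.length : Int) - 9) 1).countP
        (fun s => pyDictEq nd
          (PySem.Dict.counter (PySem.List.slice discount (some s) (some (s + 10))))) =
        (PySem.List.pyRange 1 ((discount.length : Int) - 9) 1).countP
        (fun s => pyDictEq
          (PySem.Dict.counter (PySem.List.slice discount (some s) (some (s + 10)))) nd) := by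
      apply List.countP_congr
      intro s _
      rw [pv_pyDictEq_comm]
    rw [hA, hmax, hcnt, h010, pv_pyDictEq_comm]
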